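-- pv_equiv track=rewrite | github.com/PhilippePego95/eclipse-espaiTreball | EI1003/examens/enero2017_1.py | cantidad_estancias
-- ===== SOURCE A (Python) =====
-- def cantidad_estancias(matriz,cliente):
--     cantidad=0
--     total=0
--     for i in range(len(matriz)):
--         for j in range(len(matriz[0])):
--             if matriz[i][j]==cliente:
--                 cantidad+=1
--             else:
--                 if cantidad>0:
--                     total+=1
--                 cantidad=0
--     if cantidad>0:
--         total+=1
--     return total
-- ===== SOURCE B (Python) =====
-- def cantidad_estancias(matriz, cliente):
--     # Runs of cliente = (occurrences of cliente) - (internal adjacencies of cliente):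
--     # two independent counting passes over the flattened matrix, no run-state machine.
--     flat = [matriz[i][j] for i in range(len(matriz)) for j in range(len(matriz[0]))]
--     return flat.count(cliente) - sum(1 for a, b in zip(flat, flat[1:])
--                                      if a == cliente and b == cliente)
-- ===== Notes on version B (the rewrite author's own statement) =====
-- stated objective: alternative
-- what changed: Replaces A's cantidad/total run-tracking state machine by the arithmetic identity runs = occurrences - internal adjacencies, computed as two independent counts over the flattened matrix.
import Mathlib
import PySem

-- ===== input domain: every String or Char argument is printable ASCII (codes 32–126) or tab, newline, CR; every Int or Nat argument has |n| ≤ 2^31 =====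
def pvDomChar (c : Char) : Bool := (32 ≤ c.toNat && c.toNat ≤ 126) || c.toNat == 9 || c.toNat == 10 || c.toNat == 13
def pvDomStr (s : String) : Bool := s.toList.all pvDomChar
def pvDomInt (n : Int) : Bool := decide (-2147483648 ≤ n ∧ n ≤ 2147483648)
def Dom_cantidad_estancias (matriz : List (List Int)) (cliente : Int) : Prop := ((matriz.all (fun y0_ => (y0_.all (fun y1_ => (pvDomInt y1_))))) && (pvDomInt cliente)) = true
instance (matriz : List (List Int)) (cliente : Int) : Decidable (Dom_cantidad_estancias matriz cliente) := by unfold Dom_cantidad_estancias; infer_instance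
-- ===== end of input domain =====

-- B replaces A's run-tracking state machine by the identity runs = occurrences -
-- internal adjacencies, as two independent counts over the flattened matrix (objective: alternative).


-- ===== PORT A =====
def cantidad_estancias (matriz : List (List Int)) (cliente : Int) : Int :=
  let st :=
    (PySem.List.pyRange 0 (matriz.length : Int) 1).foldl (fun (st : Int × Int) i =>
      (PySem.List.pyRange 0 ((PySem.List.pyGetD matriz 0 []).length : Int) 1).foldl
        (fun (st : Int × Int) j =>
          if PySem.List.pyGetD (PySem.List.pyGetD matriz i []) j 0 = cliente then
            (st.1 + 1, st.2)
          else if st.1 > 0 then (0, st.2 + 1) else (0, st.2)) st) (0, 0)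
  if st.1 > 0 then st.2 + 1 else st.2

-- ===== PORT B =====
def cantidad_estancias_alt (matriz : List (List Int)) (cliente : Int) : Int :=
  let flat :=
    (PySem.List.pyRange 0 (matriz.length : Int) 1).flatMap (fun i =>
      (PySem.List.pyRange 0 ((PySem.List.pyGetD matriz 0 []).length : Int) 1).map (fun j =>
        PySem.List.pyGetD (PySem.List.pyGetD matriz i []) j 0))
  (PySem.List.count flat cliente : Int) -
    ((flat.zip (PySem.List.slice flat (some 1) none)).foldl
      (fun (t : Int) p => if p.1 = cliente ∧ p.2 = cliente then t + 1 else t) 0)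

-- ===== PRECONDITION & SPEC =====
-- Pre_ excludes jagged matrices whose first row is longer than some later row:
-- there A (and B alike) raises IndexError when indexing that row.
def Pre_cantidad_estancias (matriz : List (List Int)) (cliente : Int) : Prop :=
  ∀ row ∈ matriz, (matriz.headD []).length ≤ row.length
instance (matriz : List (List Int)) (cliente : Int) : Decidable (Pre_cantidad_estancias matriz cliente) := by unfold Pre_cantidad_estancias; infer_instance
def pvWitness_cantidad_estancias : List (List Int) × Int := ([[1, 2, 1], [1, 1, 2]], 1)

def Spec_cantidad_estancias (matriz : List (List Int)) (cliente : Int) (out : Int) : Prop := out = cantidad_estancias_alt matriz cliente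
instance (matriz : List (List Int)) (cliente : Int) (out : Int) : Decidable (Spec_cantidad_estancias matriz cliente out) := by unfold Spec_cantidad_estancias; infer_instance

-- ===== CLAIM (what is proved, stated in full; the proofs are below) =====
def Claim_equal_cantidad_estancias : Prop := ∀ (matriz : List (List Int)) (cliente : Int), Dom_cantidad_estancias matriz cliente → Pre_cantidad_estancias matriz cliente → Spec_cantidad_estancias matriz cliente (cantidad_estancias matriz cliente)

-- ===== LEMMAS AND PROOFS =====

-- A's inner state step on one cell value.
def pvStepA (c : Int) (st : Int × Int) (x : Int) : Int × Int :=
  if x = c then (st.1 + 1, st.2)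
  else if st.1 > 0 then (0, st.2 + 1) else (0, st.2)

-- A's post-loop finish.
def pvFin (st : Int × Int) : Int := if st.1 > 0 then st.2 + 1 else st.2

-- Run-start count of c in l given the predecessor prev (intermediate notion).
def pvRuns (c : Int) (prev : Option Int) (l : List Int) : Int :=
  (((prev :: l.map some).zip l).countP
    (fun pa => decide (pa.2 = c ∧ pa.1 ≠ some c)) : Nat)

-- B's adjacency count.
def pvPairs (c : Int) (l : List Int) : Int :=
  ((l.zip l.tail).countP (fun p => decide (p.1 = c ∧ p.2 = c)) : Nat)

theorem pvRuns_cons (c : Int) (prev : Option Int) (x : Int) (xs : List Int) :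
    pvRuns c prev (x :: xs) =
      (if x = c ∧ prev ≠ some c then 1 else 0) + pvRuns c (some x) xs := by
  simp [pvRuns, List.countP_cons]
  by_cases h : x = c ∧ prev ≠ some c <;> simp [h] <;> omega

-- The key invariant: finishing A's fold from state (cant, total) equals
-- total, plus 1 for the run in progress, plus the run-start count.
theorem pvKey (c : Int) (l : List Int) :
    ∀ (cant total : Int) (prev : Option Int), 0 ≤ cant → (prev = some c ↔ 0 < cant) →
      pvFin (l.foldl (pvStepA c) (cant, total)) =
        total + (if 0 < cant then 1 else 0) + pvRuns c prev l := by
  induction l with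
  | nil =>
    intro cant total prev _ _
    simp [pvFin, pvRuns]
    by_cases h : 0 < cant <;> simp [h]
  | cons x xs ih =>
    intro cant total prev hcant hprev
    rw [pvRuns_cons]
    by_cases hx : x = c
    · have h1 : pvStepA c (cant, total) x = (cant + 1, total) := by simp [pvStepA, hx]
      rw [List.foldl_cons, h1, ih (cant + 1) total (some x) (by omega) (by simp [hx]; omega)]
      by_cases hc : 0 < cant
      · have : prev = some c := hprev.mpr hc
        simp [hx, this, hc]
        omega
      · have : ¬ prev = some c := fun h => hc (hprev.mp h)
        simp [hx, this, hc]
        omega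
    · have h1 : pvStepA c (cant, total) x =
          (0, if cant > 0 then total + 1 else total) := by
        simp [pvStepA, hx]; by_cases h : cant > 0 <;> simp [h]
      rw [List.foldl_cons, h1, ih 0 _ (some x) (by omega) (by simp [hx])]
      simp [hx]
      by_cases hc : 0 < cant <;> simp [hc]

-- Run-start count = occurrences minus internal adjacencies (B's identity),
-- with a correction when a run is already in progress at the head.
theorem pvRuns_count (c : Int) :
    ∀ (l : List Int) (prev : Option Int),
      pvRuns c prev l = (l.count c : Int) - pvPairs c l -
        (if prev = some c ∧ l.head? = some c then 1 else 0) := by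
  intro l
  induction l with
  | nil => intro prev; simp [pvRuns, pvPairs]
  | cons x xs ih =>
    intro prev
    rw [pvRuns_cons, ih (some x)]
    cases xs with
    | nil =>
      simp [pvPairs, List.count_cons]
      by_cases hx : x = c <;> by_cases hp : prev = some c <;> simp [hx, hp] <;> omega
    | cons y ys =>
      have hpairs : pvPairs c (x :: y :: ys) =
          (if x = c ∧ y = c then 1 else 0) + pvPairs c (y :: ys) := by
        simp [pvPairs, List.countP_cons]
        by_cases h : x = c ∧ y = c <;> simp [h] <;> omega
      rw [hpairs]
      simp only [List.count_cons, List.head?_cons]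
      by_cases hx : x = c <;> by_cases hy : y = c <;> by_cases hp : prev = some c <;>
        simp [hx, hy, hp] <;> push_cast <;> omega

-- A's nested index fold equals the fold of pvStepA over the flattened list.
theorem pvFlatten (matriz : List (List Int)) (c : Int) (init : Int × Int) :
    (PySem.List.pyRange 0 (matriz.length : Int) 1).foldl (fun (st : Int × Int) i =>
      (PySem.List.pyRange 0 ((PySem.List.pyGetD matriz 0 []).length : Int) 1).foldl
        (fun (st : Int × Int) j =>
          pvStepA c st (PySem.List.pyGetD (PySem.List.pyGetD matriz i []) j 0)) st) init =
    ((PySem.List.pyRange 0 (matriz.length : Int) 1).flatMap (fun i =>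
      (PySem.List.pyRange 0 ((PySem.List.pyGetD matriz 0 []).length : Int) 1).map (fun j =>
        PySem.List.pyGetD (PySem.List.pyGetD matriz i []) j 0))).foldl (pvStepA c) init := by
  induction (PySem.List.pyRange 0 (matriz.length : Int) 1) generalizing init with
  | nil => simp
  | cons i is ih => simp [List.foldl_append, List.foldl_map, ih]

-- B's value equals count minus pvPairs of the flattened list.
theorem pvAltEq (matriz : List (List Int)) (cliente : Int) :
    cantidad_estancias_alt matriz cliente =
      (((PySem.List.pyRange 0 (matriz.length : Int) 1).flatMap (fun i =>
          (PySem.List.pyRange 0 ((PySem.List.pyGetD matriz 0 []).length : Int) 1).map (fun j =>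
            PySem.List.pyGetD (PySem.List.pyGetD matriz i []) j 0))).count cliente : Int) -
        pvPairs cliente
          ((PySem.List.pyRange 0 (matriz.length : Int) 1).flatMap (fun i =>
            (PySem.List.pyRange 0 ((PySem.List.pyGetD matriz 0 []).length : Int) 1).map (fun j =>
              PySem.List.pyGetD (PySem.List.pyGetD matriz i []) j 0))) := by
  rw [cantidad_estancias_alt]
  rw [PySem.List.slice_from_one, PySem.List.foldl_ite_add_one]
  simp [pvPairs, PySem.List.count]

-- ===== VERDICT (by name: the statement is the Claim_ definition above) =====
theorem cantidad_estancias_spec : Claim_equal_cantidad_estancias := by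
  intro matriz cliente _ _
  unfold Spec_cantidad_estancias
  rw [pvAltEq]
  show pvFin
    ((PySem.List.pyRange 0 (matriz.length : Int) 1).foldl (fun (st : Int × Int) i =>
      (PySem.List.pyRange 0 ((PySem.List.pyGetD matriz 0 []).length : Int) 1).foldl
        (fun (st : Int × Int) j =>
          pvStepA cliente st (PySem.List.pyGetD (PySem.List.pyGetD matriz i []) j 0)) st)
      (0, 0)) = _
  rw [pvFlatten]
  rw [pvKey cliente _ 0 0 none (by omega) (by simp)]
  rw [pvRuns_count]
  simp
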